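-- pv_equiv track=rewrite | github.com/fahim0810shehab-bit/1 | audit_L3.py | detect_major
-- ===== SOURCE A (Python) =====
-- def detect_major(courses_completed, program):
--     """Detect major/concentration based on courses completed."""
--     if program.upper() != 'BBA':
--         return None, 0
--
--     majors = {
--         'Marketing': ['MKT337', 'MKT344', 'MKT460', 'MKT470'],
--         'Finance': ['FIN433', 'FIN435', 'FIN440', 'FIN444'],
--         'Accounting': ['ACT310', 'ACT320', 'ACT360', 'ACT370'],
--         'HRM': ['HRM340', 'HRM360', 'HRM380', 'HRM450'],
--         'MIS': ['MIS210', 'MIS310', 'MIS320', 'MIS470'],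
--         'Supply Chain': ['SCM310', 'SCM320', 'SCM450', 'MGT460']
--     }
--
--     major_scores = {}
--     for major_name, major_courses in majors.items():
--         completed = sum(1 for c in major_courses if c in courses_completed)
--         major_scores[major_name] = completed
--
--     # Find best matching major
--     if major_scores:
--         best_major = max(major_scores.items(), key=lambda x: x[1])[0]
--         best_score = major_scores[best_major]
--         if best_score > 0:
--             return best_major, best_score
--
--     return None, 0
-- ===== SOURCE B (Python) =====
-- def detect_major(courses_completed, program):
--     """Detect major/concentration based on courses completed."""
--     if program.upper() != 'BBA':
--         return None, 0
--
--     MAJORS = {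
--         'Marketing': ['MKT337', 'MKT344', 'MKT460', 'MKT470'],
--         'Finance': ['FIN433', 'FIN435', 'FIN440', 'FIN444'],
--         'Accounting': ['ACT310', 'ACT320', 'ACT360', 'ACT370'],
--         'HRM': ['HRM340', 'HRM360', 'HRM380', 'HRM450'],
--         'MIS': ['MIS210', 'MIS310', 'MIS320', 'MIS470'],
--         'Supply Chain': ['SCM310', 'SCM320', 'SCM450', 'MGT460']
--     }
--
--     # inverted index: course code -> major name
--     index = {c: m for m, cs in MAJORS.items() for c in cs}
--
--     # seed all majors at 0 in table order, then credit each DISTINCT completed course once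
--     scores = {m: 0 for m in MAJORS}
--     for c in set(courses_completed):
--         m = index.get(c)
--         if m is not None:
--             scores[m] += 1
--
--     # running strict max: keeps the first major of the table order on ties,
--     # and stays (None, 0) when no major course was completed
--     best, best_score = None, 0
--     for m, s in scores.items():
--         if s > best_score:
--             best, best_score = m, s
--     return best, best_score
-- ===== Notes on version B (the rewrite author's own statement) =====
-- stated objective: alternative
-- what changed: B replaces A's six per-major 'c in courses_completed' scans and max(key=...) with an inverted course-to-major index, a single pass over the deduplicated completed courses incrementing per-major counters, and a running strict max that keeps the first major on ties.
import Mathlib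
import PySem

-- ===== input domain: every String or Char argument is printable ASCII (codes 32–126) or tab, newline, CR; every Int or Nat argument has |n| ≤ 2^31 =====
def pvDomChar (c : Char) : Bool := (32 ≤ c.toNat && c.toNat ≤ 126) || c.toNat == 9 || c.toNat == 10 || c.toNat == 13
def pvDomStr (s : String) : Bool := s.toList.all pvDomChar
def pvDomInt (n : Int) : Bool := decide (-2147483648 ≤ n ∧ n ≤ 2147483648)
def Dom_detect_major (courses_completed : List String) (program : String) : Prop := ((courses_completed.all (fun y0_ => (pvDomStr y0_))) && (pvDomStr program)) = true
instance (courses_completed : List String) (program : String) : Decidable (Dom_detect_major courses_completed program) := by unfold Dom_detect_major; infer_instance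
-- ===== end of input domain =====

-- B replaces A's per-major membership scans with an inverted course->major index over deduplicated
-- completed courses and a running strict max (alternative decomposition, same cost on this fixed table).


-- ===== PORT A =====
-- A's dict literal `majors` (distinct keys, insertion order)
def pvMajorsA : List (String × List String) :=
  [("Marketing", ["MKT337", "MKT344", "MKT460", "MKT470"]),
   ("Finance", ["FIN433", "FIN435", "FIN440", "FIN444"]),
   ("Accounting", ["ACT310", "ACT320", "ACT360", "ACT370"]),
   ("HRM", ["HRM340", "HRM360", "HRM380", "HRM450"]),
   ("MIS", ["MIS210", "MIS310", "MIS320", "MIS470"]),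
   ("Supply Chain", ["SCM310", "SCM320", "SCM450", "MGT460"])]

-- for major_name, major_courses in majors.items(): major_scores[...] = sum(1 for c … if c in courses_completed)
def pvScoresA (courses_completed : List String) : PySem.Dict String Int :=
  (PySem.Dict.ofList pvMajorsA).items.foldl
    (fun d p => d.insert p.1 (p.2.foldl (fun acc c => if courses_completed.contains c then acc + 1 else acc) 0))
    PySem.Dict.empty

def detect_major (courses_completed : List String) (program : String) : Option String × Int :=
  if PySem.Str.upper program ≠ "BBA" then (none, 0)
  else
    if (pvScoresA courses_completed).size ≠ 0 then
      match PySem.List.max? (pvScoresA courses_completed).items (fun x => x.2) with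
      | some best =>
          -- major_scores[best_major]: the key comes from major_scores.items, so the total lookup is exact
          if (pvScoresA courses_completed).getD best.1 0 > 0
          then (some best.1, (pvScoresA courses_completed).getD best.1 0) else (none, 0)
      | none => (none, 0)   -- unreachable: max() of a nonempty list
    else (none, 0)

-- ===== PORT B =====
-- B's dict literal MAJORS
def pvMajorsB : List (String × List String) :=
  [("Marketing", ["MKT337", "MKT344", "MKT460", "MKT470"]),
   ("Finance", ["FIN433", "FIN435", "FIN440", "FIN444"]),
   ("Accounting", ["ACT310", "ACT320", "ACT360", "ACT370"]),
   ("HRM", ["HRM340", "HRM360", "HRM380", "HRM450"]),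
   ("MIS", ["MIS210", "MIS310", "MIS320", "MIS470"]),
   ("Supply Chain", ["SCM310", "SCM320", "SCM450", "MGT460"])]

-- index = {c: m for m, cs in MAJORS.items() for c in cs}
def pvIndexB : PySem.Dict String String :=
  (PySem.Dict.ofList pvMajorsB).items.foldl
    (fun d p => p.2.foldl (fun d c => d.insert c p.1) d) PySem.Dict.empty

-- scores = {m: 0 for m in MAJORS}
def pvScores0 : PySem.Dict String Int :=
  (PySem.Dict.ofList pvMajorsB).keys.foldl (fun d m => d.insert m 0) PySem.Dict.empty

-- loop body: m = index.get(c); if m is not None: scores[m] += 1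
def pvBStep (d : PySem.Dict String Int) (c : String) : PySem.Dict String Int :=
  match pvIndexB.get? c with
  | some m => d.modify m 0 (· + 1)
  | none => d

-- for c in set(courses_completed): the increments commute, so any set iteration order gives this value
def pvScoresB (courses_completed : List String) : PySem.Dict String Int :=
  (PySem.Set.ofList courses_completed).foldl pvBStep pvScores0

def detect_major_alt (courses_completed : List String) (program : String) : Option String × Int :=
  if PySem.Str.upper program ≠ "BBA" then (none, 0)
  else
    -- running strict max over scores.items()
    (pvScoresB courses_completed).items.foldl
      (fun bp p => if bp.2 < p.2 then (some p.1, p.2) else bp)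
      ((none : Option String), (0 : Int))

-- ===== PRECONDITION & SPEC =====
def Spec_detect_major (courses_completed : List String) (program : String) (out : Option String × Int) : Prop := out = detect_major_alt courses_completed program
instance (courses_completed : List String) (program : String) (out : Option String × Int) : Decidable (Spec_detect_major courses_completed program out) := by unfold Spec_detect_major; infer_instance

-- ===== CLAIM (what is proved, stated in full; the proofs are below) =====
def Claim_equal_detect_major : Prop := ∀ (courses_completed : List String) (program : String), Dom_detect_major courses_completed program → Spec_detect_major courses_completed program (detect_major courses_completed program)

-- ===== LEMMAS AND PROOFS =====

-- the inverted index as a literal (24 fresh inserts append in table order)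
set_option maxHeartbeats 2000000 in
theorem pvIndexB_eq : pvIndexB = PySem.Dict.mk
    [("MKT337", "Marketing"), ("MKT344", "Marketing"), ("MKT460", "Marketing"), ("MKT470", "Marketing"),
     ("FIN433", "Finance"), ("FIN435", "Finance"), ("FIN440", "Finance"), ("FIN444", "Finance"),
     ("ACT310", "Accounting"), ("ACT320", "Accounting"), ("ACT360", "Accounting"), ("ACT370", "Accounting"),
     ("HRM340", "HRM"), ("HRM360", "HRM"), ("HRM380", "HRM"), ("HRM450", "HRM"),
     ("MIS210", "MIS"), ("MIS310", "MIS"), ("MIS320", "MIS"), ("MIS470", "MIS"),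
     ("SCM310", "Supply Chain"), ("SCM320", "Supply Chain"), ("SCM450", "Supply Chain"), ("MGT460", "Supply Chain")] := by
  rfl

-- every value of the index is one of the six majors
theorem pvIndexB_range (c m : String) (h : pvIndexB.get? c = some m) :
    m = "Marketing" ∨ m = "Finance" ∨ m = "Accounting" ∨ m = "HRM" ∨ m = "MIS" ∨ m = "Supply Chain" := by
  have hmem := PySem.Dict.mem_items_of_get?_eq_some _ h
  have hall : ∀ p ∈ pvIndexB.items,
      p.2 = "Marketing" ∨ p.2 = "Finance" ∨ p.2 = "Accounting" ∨ p.2 = "HRM" ∨ p.2 = "MIS" ∨ p.2 = "Supply Chain" := by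
    rw [pvIndexB_eq]
    decide
  exact hall (c, m) hmem

-- pointwise reading of the index: get? hits m exactly on m's course list
theorem idx_pred_gen (m : String) (l : List String)
    (h1 : ∀ p ∈ pvIndexB.items, p.2 = m → p.1 ∈ l)
    (h2 : ∀ c ∈ l, pvIndexB.get? c = some m) :
    ∀ c : String, (pvIndexB.get? c == some m) = l.contains c := by
  intro c
  by_cases hc : c ∈ l
  · rw [h2 c hc]
    simp [hc]
  · cases hg : pvIndexB.get? c with
    | none => simp [hc]
    | some m' =>
      have hm : m' ≠ m := fun he =>
        hc (h1 (c, m') (PySem.Dict.mem_items_of_get?_eq_some _ hg) he)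
      simp [hm, hc]

-- B's counting fold: the value at m grows by the number of scanned courses indexed to m
theorem getD_bfold (l : List String) (d : PySem.Dict String Int) (m : String) :
    (l.foldl pvBStep d).getD m 0
      = d.getD m 0 + (l.countP (fun c => pvIndexB.get? c == some m) : Int) := by
  induction l generalizing d with
  | nil => simp
  | cons c l ih =>
    simp only [List.foldl_cons, List.countP_cons]
    cases h : pvIndexB.get? c with
    | none => rw [show pvBStep d c = d by simp [pvBStep, h], ih]; simp
    | some m' =>
      rw [show pvBStep d c = d.modify m' 0 (· + 1) by simp [pvBStep, h], ih, PySem.Dict.getD_modify]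
      have hsm : ((some m' == some m) = true) = (m' = m) := by simp
      simp only [hsm]
      rcases eq_or_ne m m' with hm | hm
      · subst hm
        rw [if_pos rfl, if_pos rfl]
        push_cast
        ring
      · rw [if_neg hm, if_neg (Ne.symm hm)]
        simp

-- B's counting fold never changes the key set (every index value is an existing key)
theorem keys_bfold (l : List String) (d : PySem.Dict String Int)
    (h : ∀ c m, pvIndexB.get? c = some m → d.contains m = true) :
    (l.foldl pvBStep d).keys = d.keys := by
  induction l generalizing d with
  | nil => rfl
  | cons c l ih =>
    simp only [List.foldl_cons]
    cases hc : pvIndexB.get? c with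
    | none => rw [show pvBStep d c = d by simp [pvBStep, hc]]; exact ih d h
    | some m =>
      have hkeys : (d.modify m 0 (· + 1)).keys = d.keys := by
        rw [PySem.Dict.keys_modify, PySem.Dict.keys_insert_of_contains _ _ (h c m hc)]
      have h' : ∀ c' m', pvIndexB.get? c' = some m' → (d.modify m 0 (· + 1)).contains m' = true := by
        intro c' m' hc'
        rw [PySem.Dict.contains_iff_mem_keys, hkeys, ← PySem.Dict.contains_iff_mem_keys]
        exact h c' m' hc'
      rw [show pvBStep d c = d.modify m 0 (· + 1) by simp [pvBStep, hc], ih _ h', hkeys]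

-- counting distinct xs-elements inside a duplicate-free l = counting l-elements inside xs
theorem count_swap (xs l : List String) (hl : l.Nodup) :
    (PySem.Set.ofList xs).countP (fun c => l.contains c) = l.countP (fun c => xs.contains c) := by
  classical
  rw [List.countP_eq_length_filter, List.countP_eq_length_filter]
  rw [← List.toFinset_card_of_nodup ((PySem.Set.nodup_ofList xs).filter _),
      ← List.toFinset_card_of_nodup (hl.filter _)]
  congr 1
  ext c
  simp [PySem.Set.mem_ofList]
  tauto

-- one major's score in B equals A's membership count over that major's course list
theorem per_major (cc : List String) (l : List String) (m : String) (hl : l.Nodup)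
    (hidx : ∀ c : String, (pvIndexB.get? c == some m) = l.contains c) :
    ((PySem.Set.ofList cc).countP (fun c => pvIndexB.get? c == some m) : Int)
      = l.foldl (fun acc c => if cc.contains c then acc + 1 else acc) 0 := by
  rw [PySem.List.foldl_count_if]
  have h1 : (PySem.Set.ofList cc).countP (fun c => pvIndexB.get? c == some m)
      = (PySem.Set.ofList cc).countP (fun c => l.contains c) := by
    exact List.countP_congr (fun x _ => by rw [hidx x])
  rw [h1, count_swap cc l hl]
  have h2 : l.countP (fun c => cc.contains c) = l.countP (fun c => decide (c ∈ cc)) :=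
    List.countP_congr (fun x _ => by simp)
  rw [h2]
  simp

-- Python max(key=·[1]) over a nonempty list is the left fold that keeps the first maximum
theorem max?_cons (p : String × Int) (t : List (String × Int)) :
    PySem.List.max? (p :: t) (fun x => x.2)
      = some (t.foldl (fun m x => if m.2 < x.2 then x else m) p) := by
  induction t generalizing p with
  | nil => rfl
  | cons x t ih =>
    have h1 : PySem.List.max? (p :: x :: t) (fun y => y.2)
        = PySem.List.max? ((if p.2 < x.2 then x else p) :: t) (fun y => y.2) := by
      simp only [PySem.List.max?, List.foldl_cons]
      congr 1
      split_ifs <;> rfl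
    rw [h1, ih, List.foldl_cons]

-- B's running strict max tracks A's running max once the score is positive
theorem bfold_pos (t : List (String × Int)) (m : String × Int) (hm : 0 < m.2) :
    t.foldl (fun bp p => if bp.2 < p.2 then (some p.1, p.2) else bp) (some m.1, m.2)
        = (some (t.foldl (fun m x => if m.2 < x.2 then x else m) m).1,
           (t.foldl (fun m x => if m.2 < x.2 then x else m) m).2)
      ∧ 0 < (t.foldl (fun m x => if m.2 < x.2 then x else m) m).2 := by
  induction t generalizing m with
  | nil => exact ⟨rfl, hm⟩
  | cons x t ih =>
    by_cases h : m.2 < x.2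
    · simpa [h] using ih x (by omega)
    · simpa [h] using ih m hm

theorem bfold_start (t : List (String × Int)) (m : String × Int) (hm : m.2 ≤ 0) :
    t.foldl (fun bp p => if bp.2 < p.2 then (some p.1, p.2) else bp) (none, 0)
      = (if 0 < (t.foldl (fun m x => if m.2 < x.2 then x else m) m).2
         then (some (t.foldl (fun m x => if m.2 < x.2 then x else m) m).1,
               (t.foldl (fun m x => if m.2 < x.2 then x else m) m).2)
         else (none, 0)) := by
  induction t generalizing m with
  | nil => simp [show ¬ (0 < m.2) by omega]
  | cons x t ih =>
    rw [List.foldl_cons, List.foldl_cons]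
    rw [show ((none : Option String), (0:Int)).2 = (0:Int) from rfl]
    by_cases h : 0 < x.2
    · have hmx : m.2 < x.2 := by omega
      rw [if_pos h, if_pos hmx]
      exact (bfold_pos t x h).1.trans (by rw [if_pos (bfold_pos t x h).2])
    · have hx : x.2 ≤ 0 := by omega
      rw [if_neg h]
      by_cases hmx : m.2 < x.2
      · rw [if_pos hmx]; exact ih x hx
      · rw [if_neg hmx]; exact ih m hm

-- the whole tail: B's running strict max from (None, 0) equals A's max-then-guard
theorem finish (p : String × Int) (rest : List (String × Int)) :
    (p :: rest).foldl (fun bp p => if bp.2 < p.2 then (some p.1, p.2) else bp) (none, 0)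
      = (if 0 < (rest.foldl (fun m x => if m.2 < x.2 then x else m) p).2
         then (some (rest.foldl (fun m x => if m.2 < x.2 then x else m) p).1,
               (rest.foldl (fun m x => if m.2 < x.2 then x else m) p).2)
         else (none, 0)) := by
  rw [List.foldl_cons]
  rw [show ((none : Option String), (0:Int)).2 = (0:Int) from rfl]
  by_cases h : 0 < p.2
  · rw [if_pos h]
    exact (bfold_pos rest p h).1.trans (by rw [if_pos (bfold_pos rest p h).2])
  · rw [if_neg h]
    exact bfold_start rest p (by omega)

-- A's score table as a literal list of the six majors with their membership counts
theorem itemsA_lit (cc : List String) : (pvScoresA cc).items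
    = [("Marketing", ["MKT337", "MKT344", "MKT460", "MKT470"].foldl (fun acc c => if cc.contains c then acc + 1 else acc) 0),
       ("Finance", ["FIN433", "FIN435", "FIN440", "FIN444"].foldl (fun acc c => if cc.contains c then acc + 1 else acc) 0),
       ("Accounting", ["ACT310", "ACT320", "ACT360", "ACT370"].foldl (fun acc c => if cc.contains c then acc + 1 else acc) 0),
       ("HRM", ["HRM340", "HRM360", "HRM380", "HRM450"].foldl (fun acc c => if cc.contains c then acc + 1 else acc) 0),
       ("MIS", ["MIS210", "MIS310", "MIS320", "MIS470"].foldl (fun acc c => if cc.contains c then acc + 1 else acc) 0),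
       ("Supply Chain", ["SCM310", "SCM320", "SCM450", "MGT460"].foldl (fun acc c => if cc.contains c then acc + 1 else acc) 0)] := by
  unfold pvScoresA
  rw [show (PySem.Dict.ofList pvMajorsA).items = pvMajorsA by decide]
  rw [PySem.Dict.items_foldl_insert_fresh pvMajorsA Prod.fst
    (fun p => p.2.foldl (fun acc c => if cc.contains c then acc + 1 else acc) 0)
    PySem.Dict.empty (fun a _ => rfl) (by decide)]
  rfl

-- the six per-major score equalities, assembled: B's items list equals A's items list
theorem items_eq (cc : List String) : (pvScoresB cc).items = (pvScoresA cc).items := by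
  have hA := itemsA_lit cc
  have hk0 : ∀ (c m : String), pvIndexB.get? c = some m → pvScores0.contains m = true := by
    intro c m h
    rcases pvIndexB_range c m h with h | h | h | h | h | h <;> subst h <;> decide
  have hkeysB : (pvScoresB cc).keys
      = ["Marketing", "Finance", "Accounting", "HRM", "MIS", "Supply Chain"] := by
    unfold pvScoresB
    rw [keys_bfold _ _ hk0]
    decide
  have hnodB : (pvScoresB cc).keys.Nodup := by rw [hkeysB]; decide
  have hval : ∀ (m : String) (l : List String), l.Nodup → pvScores0.getD m 0 = 0 →
      (∀ c : String, (pvIndexB.get? c == some m) = l.contains c) →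
      (pvScoresB cc).getD m 0 = l.foldl (fun acc c => if cc.contains c then acc + 1 else acc) 0 := by
    intro m l hl h0 hidx
    unfold pvScoresB
    rw [getD_bfold, h0, zero_add]
    exact per_major cc l m hl hidx
  rw [PySem.Dict.items_eq_map_keys _ hnodB 0, hkeysB, hA]
  simp only [List.map]
  rw [hval "Marketing" ["MKT337", "MKT344", "MKT460", "MKT470"] (by decide) (by decide)
        (idx_pred_gen _ _ (by decide) (by decide)),
      hval "Finance" ["FIN433", "FIN435", "FIN440", "FIN444"] (by decide) (by decide)
        (idx_pred_gen _ _ (by decide) (by decide)),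
      hval "Accounting" ["ACT310", "ACT320", "ACT360", "ACT370"] (by decide) (by decide)
        (idx_pred_gen _ _ (by decide) (by decide)),
      hval "HRM" ["HRM340", "HRM360", "HRM380", "HRM450"] (by decide) (by decide)
        (idx_pred_gen _ _ (by decide) (by decide)),
      hval "MIS" ["MIS210", "MIS310", "MIS320", "MIS470"] (by decide) (by decide)
        (idx_pred_gen _ _ (by decide) (by decide)),
      hval "Supply Chain" ["SCM310", "SCM320", "SCM450", "MGT460"] (by decide) (by decide)
        (idx_pred_gen _ _ (by decide) (by decide))]

-- ===== VERDICT (by name: the statement is the Claim_ definition above) =====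
theorem detect_major_spec : Claim_equal_detect_major := by
  intro cc prog _
  unfold Spec_detect_major detect_major detect_major_alt
  by_cases hp : PySem.Str.upper prog ≠ "BBA"
  · rw [if_pos hp, if_pos hp]
  · rw [if_neg hp, if_neg hp, items_eq cc]
    have hA := itemsA_lit cc
    have hnodA : (pvScoresA cc).keys.Nodup := by
      simp only [PySem.Dict.keys, hA, List.map]
      decide
    have hsize : (pvScoresA cc).size ≠ 0 := by
      simp [PySem.Dict.size, hA]
    rw [if_pos hsize]
    cases hmx : PySem.List.max? (pvScoresA cc).items (fun x => x.2) with
    | none =>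
      rw [hA, max?_cons] at hmx
      exact absurd hmx (by simp)
    | some best =>
      have hmem : best ∈ (pvScoresA cc).items := PySem.List.max?_mem hmx
      have hgd : (pvScoresA cc).getD best.1 0 = best.2 :=
        PySem.Dict.getD_of_mem_items _ (by rw [Prod.mk.eta]; exact hmem) hnodA 0
      rw [hA, max?_cons] at hmx
      rw [hA, finish]
      injection hmx with hb
      rw [hb]
      simp [hgd]
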